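-- pv_equiv track=rewrite | github.com/ZhiHanL/BankAccounting | BankAccounting/processor_types/mastercard.py | extract_transaction_lines_mastercard
-- ===== SOURCE A (Python) =====
-- def extract_transaction_lines_mastercard(data_array):
--     is_transactions = False
--     transactions = []
--     for line in data_array:
--         if line == 'Time to Pay':
--             break
--         if is_transactions and line != '':
--             try:
--                 int(line)
--             except Exception:
--                 transactions.append(line)
--         if line == 'DATE DATE':
--             is_transactions = True
--         if 'STATEMENT FROM' in line:
--             year = line[-4:]
--     transactions.pop()
--     return transactions, year
-- ===== SOURCE B (Python) =====
-- def _is_int(s):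
--     try:
--         int(s)
--         return True
--     except ValueError:
--         return False
--
--
-- def extract_transaction_lines_mastercard(data_array):
--     try:
--         stop = data_array.index('Time to Pay')
--     except ValueError:
--         stop = len(data_array)
--     prefix = data_array[:stop]
--     if 'DATE DATE' in prefix:
--         start = prefix.index('DATE DATE') + 1
--     else:
--         start = len(prefix)
--     transactions = [line for line in prefix[start:]
--                     if line != '' and not _is_int(line)]
--     year = [line for line in prefix if 'STATEMENT FROM' in line][-1][-4:]
--     return transactions[:-1], year
-- ===== Notes on version B (the rewrite author's own statement) =====
-- stated objective: alternative
-- what changed: A's single stateful scan with a flag, a break and an in-loop year assignment is replaced by a pipeline: locate the 'Time to Pay' stop and the first 'DATE DATE' by index, slice, filter the transaction lines with a comprehension, and take the last 'STATEMENT FROM' line for the year.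
import Mathlib
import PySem

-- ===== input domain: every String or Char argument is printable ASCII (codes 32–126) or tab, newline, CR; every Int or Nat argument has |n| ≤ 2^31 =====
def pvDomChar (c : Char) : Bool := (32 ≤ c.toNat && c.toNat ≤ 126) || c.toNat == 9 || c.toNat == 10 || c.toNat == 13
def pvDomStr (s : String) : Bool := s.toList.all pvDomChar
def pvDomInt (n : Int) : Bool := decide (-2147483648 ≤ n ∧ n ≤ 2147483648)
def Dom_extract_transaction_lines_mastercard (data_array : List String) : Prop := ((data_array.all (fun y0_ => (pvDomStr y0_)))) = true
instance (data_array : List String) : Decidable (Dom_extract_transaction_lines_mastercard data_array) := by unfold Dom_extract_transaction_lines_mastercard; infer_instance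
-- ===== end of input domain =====

-- B replaces A's single stateful scan by an index/slice/filter decomposition (same cost);
-- equivalence is about the return value; where the Python A raises (no 'STATEMENT FROM' line,
-- or no transaction line before the first 'Time to Pay') is excluded by Pre_.

-- shared tiny predicates (exact ports of the line tests both Pythons perform)
def pvKeep (l : String) : Bool := !(l == "") && (PySem.Int.ofStr? l).isNone
def pvStmt (l : String) : Bool := PySem.Str.isIn "STATEMENT FROM" l
def pvYear4 (l : String) : String := PySem.Str.slice l (some (-4)) none

-- ===== PORT A =====
-- the for-loop of A: state (is_transactions, transactions, year); break on 'Time to Pay'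
def pvGoA : List String → Bool → List String → Option String → List String × Option String
  | [], _, txs, y => (txs, y)
  | l :: rest, isT, txs, y =>
    if l == "Time to Pay" then (txs, y)
    else pvGoA rest
      (if l == "DATE DATE" then true else isT)
      (if isT && pvKeep l then txs ++ [l] else txs)
      (if pvStmt l then some (pvYear4 l) else y)

def extract_transaction_lines_mastercard (data_array : List String) : List String × String :=
  let r := pvGoA data_array false [] none
  -- transactions.pop() and the read of 'year' raise outside Pre_; there the port's value is unclaimed
  (r.1.dropLast, r.2.getD "")

-- ===== PORT B =====
def extract_transaction_lines_mastercard_alt (data_array : List String) : List String × String :=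
  let stop : Nat := (PySem.List.index? data_array "Time to Pay").getD data_array.length
  let pref := PySem.List.slice data_array none (some (stop : Int))
  let start : Nat := match PySem.List.index? pref "DATE DATE" with
    | some i => i + 1
    | none => pref.length
  let txs := (PySem.List.slice pref (some (start : Int)) none).filter pvKeep
  -- [line for line in prefix if 'STATEMENT FROM' in line][-1][-4:]; the [-1] raises outside Pre_
  let year := ((PySem.List.pyGet? (pref.filter pvStmt) (-1)).map pvYear4).getD ""
  (PySem.List.slice txs none (some (-1)), year)

-- ===== PRECONDITION & SPEC =====
-- the lines before the first 'Time to Pay'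
def pvPref (xs : List String) : List String := xs.takeWhile (fun l => !(l == "Time to Pay"))
-- one past the first 'DATE DATE', or the end
def pvStartOf (p : List String) : Nat :=
  match PySem.List.index? p "DATE DATE" with
  | some i => i + 1
  | none => p.length

-- Pre_ is exactly where the Python A returns: before the first 'Time to Pay' there must be a line
-- containing 'STATEMENT FROM' (else UnboundLocalError) and at least one non-empty non-integer line
-- strictly after the first 'DATE DATE' (else transactions.pop() raises IndexError).
def Pre_extract_transaction_lines_mastercard (data_array : List String) : Prop :=
  (pvPref data_array).any pvStmt = true ∧
  ((pvPref data_array).drop (pvStartOf (pvPref data_array))).filter pvKeep ≠ []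
instance (data_array : List String) : Decidable (Pre_extract_transaction_lines_mastercard data_array) := by
  unfold Pre_extract_transaction_lines_mastercard; infer_instance

def pvWitness_extract_transaction_lines_mastercard : List String :=
  ["STATEMENT FROM 2021", "DATE DATE", "ABC", "DEF"]

def Spec_extract_transaction_lines_mastercard (data_array : List String) (out : List String × String) : Prop := out = extract_transaction_lines_mastercard_alt data_array
instance (data_array : List String) (out : List String × String) : Decidable (Spec_extract_transaction_lines_mastercard data_array out) := by unfold Spec_extract_transaction_lines_mastercard; infer_instance

-- ===== CLAIM (what is proved, stated in full; the proofs are below) =====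
def Claim_equal_extract_transaction_lines_mastercard : Prop := ∀ (data_array : List String), Dom_extract_transaction_lines_mastercard data_array → Pre_extract_transaction_lines_mastercard data_array → Spec_extract_transaction_lines_mastercard data_array (extract_transaction_lines_mastercard data_array)


-- ===== LEMMAS AND PROOFS =====

-- transactions accumulated by A's loop over the pre-break lines, as a function of the flag
def pvT : List String → Bool → List String
  | [], _ => []
  | l :: r, isT =>
    (if isT && pvKeep l then [l] else []) ++ pvT r (if l == "DATE DATE" then true else isT)

-- the final value of A's 'year' variable over the pre-break lines
def pvY (p : List String) : Option String := ((p.filter pvStmt).getLast?).map pvYear4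

lemma pvY_cons (l : String) (p : List String) :
    pvY (l :: p) = (pvY p).or (if pvStmt l then some (pvYear4 l) else none) := by
  by_cases hs : pvStmt l
  · cases hfp : (p.filter pvStmt).getLast? <;>
      simp [pvY, hs, List.getLast?_cons, hfp]
  · simp [pvY, hs]

lemma pvGoA_eq (xs : List String) : ∀ (isT : Bool) (txs : List String) (y : Option String),
    pvGoA xs isT txs y = (txs ++ pvT (pvPref xs) isT, (pvY (pvPref xs)).or y) := by
  induction xs with
  | nil => intro isT txs y; simp [pvGoA, pvPref, pvT, pvY]
  | cons l r ih =>
    intro isT txs y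
    by_cases h : l == "Time to Pay"
    · simp [pvGoA, pvPref, pvT, pvY, h]
    · rw [show pvPref (l :: r) = l :: pvPref r by
        simp [pvPref, h]]
      simp only [pvGoA, h, Bool.false_eq_true, ite_false]
      rw [ih]
      simp only [Prod.mk.injEq]
      refine ⟨?_, ?_⟩
      · simp only [pvT]
        by_cases hc : (isT && pvKeep l) = true <;> simp [hc]
      · rw [pvY_cons, Option.or_assoc]
        by_cases hs : pvStmt l <;> simp [hs]

lemma pvT_true (p : List String) : pvT p true = p.filter pvKeep := by
  induction p with
  | nil => rfl
  | cons l r ih => by_cases h : pvKeep l <;> simp [pvT, h, ih]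

lemma pvT_false (p : List String) : pvT p false = (p.drop (pvStartOf p)).filter pvKeep := by
  induction p with
  | nil => rfl
  | cons l r ih =>
    by_cases h : l == "DATE DATE"
    · have hl : l = "DATE DATE" := by simpa using h
      subst hl
      rw [pvStartOf, PySem.List.index?_cons_self]
      simp [pvT, pvT_true]
    · simp only [pvT, h, Bool.false_eq_true, ite_false, Bool.false_and, List.nil_append, ih,
        pvStartOf, PySem.List.index?_eq_idxOf?, List.idxOf?_cons]
      cases hi : List.idxOf? "DATE DATE" r with
      | none => simp
      | some i => simp [hi]

lemma take_index_eq_takeWhile (xs : List String) (v : String) :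
    xs.take ((PySem.List.index? xs v).getD xs.length) = xs.takeWhile (fun l => !(l == v)) := by
  simp only [PySem.List.index?_eq_idxOf?]
  induction xs with
  | nil => rfl
  | cons l r ih =>
    rw [List.idxOf?_cons]
    by_cases h : l == v
    · simp [h]
    · cases hi : List.idxOf? v r with
      | none => simp [h, hi, ← ih]
      | some i => simp [h, hi, ← ih]

-- ===== VERDICT (by name: the statement is the Claim_ definition above) =====
theorem extract_transaction_lines_mastercard_spec : Claim_equal_extract_transaction_lines_mastercard := by
  intro data_array _ _
  unfold Spec_extract_transaction_lines_mastercard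
  unfold extract_transaction_lines_mastercard extract_transaction_lines_mastercard_alt
  rw [pvGoA_eq]
  dsimp only
  rw [PySem.List.slice_to_natCast, take_index_eq_takeWhile, ← pvPref]
  rw [PySem.List.slice_from_natCast, PySem.List.slice_to_neg_one, PySem.List.pyGet?_neg_one]
  simp only [List.nil_append, pvT_false, pvStartOf, pvY, Option.or_none]
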